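-- pv_equiv track=rewrite | github.com/crypto-01/seniorproject | model/dataprepare.py | splits_with_index
-- ===== SOURCE A (Python) =====
-- def splits_with_index(text, delim):
--     final_splits =[]
--     text_split = text.split(delim)
--     index = 0
--     for word in text_split:
--         final_splits.append((word,index))
--         index += len(word) + len(delim)
--     return final_splits
-- ===== SOURCE B (Python) =====
-- def splits_with_index(text, delim):
--     # Scan the text directly with repeated str.find instead of calling split:
--     # each piece is sliced out of the text at the found boundaries, and the
--     # recorded index is the scan position itself.
--     if not delim:
--         raise ValueError("empty separator")
--     final_splits = []
--     pos = 0
--     while True: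
--         hit = text.find(delim, pos)
--         if hit == -1:
--             final_splits.append((text[pos:], pos))
--             return final_splits
--         final_splits.append((text[pos:hit], pos))
--         pos = hit + len(delim)
-- ===== Notes on version B (the rewrite author's own statement) =====
-- stated objective: alternative
-- what changed: B never calls str.split and keeps no running length accumulator: it scans the text directly with repeated str.find, slices each piece out of the text at the found boundaries, and records the scan position itself as the piece's index.
import Mathlib
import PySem

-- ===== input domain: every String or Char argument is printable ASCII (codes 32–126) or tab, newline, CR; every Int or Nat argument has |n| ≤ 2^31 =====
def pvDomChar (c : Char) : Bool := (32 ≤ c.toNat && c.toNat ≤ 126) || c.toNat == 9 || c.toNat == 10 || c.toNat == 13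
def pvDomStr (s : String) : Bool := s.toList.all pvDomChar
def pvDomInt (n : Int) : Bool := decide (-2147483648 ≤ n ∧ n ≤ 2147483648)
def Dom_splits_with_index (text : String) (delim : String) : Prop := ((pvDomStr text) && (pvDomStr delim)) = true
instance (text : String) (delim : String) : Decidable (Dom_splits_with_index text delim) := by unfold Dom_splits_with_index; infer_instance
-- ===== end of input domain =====

-- B replaces A's split-then-running-index loop with a direct scan of the text by repeated find,
-- slicing each piece out at the found boundaries and recording the scan position itself (alternative algorithm, same cost).


-- ===== PORT A =====
-- literal port: text.split(delim), then a loop appending (word, index) and advancing index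
def splits_with_index (text : String) (delim : String) : List (String × Int) :=
  let text_split := (PySem.Str.split? text delim).getD []
  (text_split.foldl
    (fun (st : List (String × Int) × Int) word =>
      (st.1 ++ [(word, st.2)], st.2 + PySem.Str.len word + PySem.Str.len delim))
    ([], 0)).1

-- ===== PORT B =====
-- port of Source B's while-loop (loop → fuel recursion; fuel = len(text)+1 iterations always suffice,
-- since pos strictly increases and stays ≤ len(text)): hit = text.find(delim, pos); slice out the piece.
def swiGoB (text delim : List Char) : Nat → Int → List (List Char × Int)
  | 0, _ => []
  | fuel+1, pos =>
    let hit := PySem.Chars.findFrom text delim pos none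
    if hit = -1 then [(PySem.Chars.slice text (some pos) none, pos)]
    else (PySem.Chars.slice text (some pos) (some hit), pos) ::
      swiGoB text delim fuel (hit + (delim.length : Int))

def splits_with_index_alt (text : String) (delim : String) : List (String × Int) :=
  (swiGoB text.toList delim.toList (text.toList.length + 1) 0).map
    (fun p => (String.ofList p.1, p.2))

-- ===== PRECONDITION & SPEC =====
-- Pre_ excludes delim = "", on which Python's str.split (in A) raises ValueError (and B raises too).
def Pre_splits_with_index (_text : String) (delim : String) : Prop := delim ≠ ""
instance (text : String) (delim : String) : Decidable (Pre_splits_with_index text delim) := by unfold Pre_splits_with_index; infer_instance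
def pvWitness_splits_with_index : String × String := ("a,b,c", ",")

def Spec_splits_with_index (text : String) (delim : String) (out : List (String × Int)) : Prop := out = splits_with_index_alt text delim
instance (text : String) (delim : String) (out : List (String × Int)) : Decidable (Spec_splits_with_index text delim out) := by unfold Spec_splits_with_index; infer_instance

-- ===== CLAIM (what is proved, stated in full; the proofs are below) =====
def Claim_equal_splits_with_index : Prop := ∀ (text : String) (delim : String), Dom_splits_with_index text delim → Pre_splits_with_index text delim → Spec_splits_with_index text delim (splits_with_index text delim)

-- ===== LEMMAS AND PROOFS =====

-- a common reference shape: pieces paired with a running index (proof device only)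
def aFoldC (dl : Nat) : List (List Char) → Int → List (List Char × Int)
  | [], _ => []
  | w :: ws, i => (w, i) :: aFoldC dl ws (i + (w.length : Int) + (dl : Int))

def aFoldS (delim : String) : List String → Int → List (String × Int)
  | [], _ => []
  | w :: ws, i => (w, i) :: aFoldS delim ws (i + PySem.Str.len w + PySem.Str.len delim)

-- the pieces of l under sep, computed by repeated find (proof device; fuel-total)
def swiPieces (sep : List Char) : Nat → List Char → List (List Char)
  | 0, l => [l]
  | f+1, l =>
    let r := PySem.Chars.find l sep
    if r < 0 then [l]
    else l.take r.toNat :: swiPieces sep f (l.drop (r.toNat + sep.length))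

-- A's foldl loop is aFoldS
theorem foldA_eq (delim : String) (ws : List String) :
    ∀ (acc : List (String × Int)) (i : Int),
      (ws.foldl
        (fun (st : List (String × Int) × Int) word =>
          (st.1 ++ [(word, st.2)], st.2 + PySem.Str.len word + PySem.Str.len delim))
        (acc, i)).1
      = acc ++ aFoldS delim ws i := by
  induction ws with
  | nil => intro acc i; simp [aFoldS]
  | cons w ws ih =>
    intro acc i
    simp only [List.foldl_cons]
    rw [ih]
    simp [aFoldS]

theorem aFoldS_map (delim : String) (ws : List (List Char)) :
    ∀ (i : Int), aFoldS delim (ws.map String.ofList) i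
      = (aFoldC delim.toList.length ws i).map (fun p => (String.ofList p.1, p.2)) := by
  induction ws with
  | nil => intro i; simp [aFoldS, aFoldC]
  | cons w ws ih =>
    intro i
    simp [aFoldS, aFoldC, ih, PySem.Str.len]

-- no occurrence: splitOn.go just emits the rest
theorem go_no_occ (sep : List Char) (_hsep : sep ≠ []) :
    ∀ (l : List Char) (fuel : Nat) (cur : List Char) (acc : List (List Char)),
      l.length ≤ fuel → ¬ sep <:+: l →
      PySem.Chars.splitOn.go sep fuel l cur acc = acc.reverse ++ [cur.reverse ++ l] := by
  intro l
  induction l with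
  | nil =>
    intro fuel cur acc _ _
    cases fuel with
    | zero => simp [PySem.Chars.splitOn.go]
    | succ f => simp [PySem.Chars.splitOn.go]
  | cons c rest ih =>
    intro fuel cur acc hfuel hni
    cases fuel with
    | zero => simp at hfuel
    | succ f =>
      rw [PySem.Chars.splitOn.go]
      have hnp : ¬ sep <+: (c :: rest) := fun h => hni h.isInfix
      rw [if_neg (by simpa [List.isPrefixOf_iff_prefix] using hnp)]
      have hni' : ¬ sep <:+: rest :=
        fun h => hni (h.trans (List.suffix_cons c rest).isInfix)
      rw [ih f (c :: cur) acc (by simp at hfuel; omega) hni']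
      simp

-- first occurrence at r: splitOn.go emits the piece before it and restarts after it
theorem go_occ (sep : List Char) (hsep : sep ≠ []) :
    ∀ (r : Nat) (l : List Char) (fuel : Nat) (cur : List Char) (acc : List (List Char)),
      l.length < fuel → sep <+: l.drop r → (∀ i, i < r → ¬ sep <+: l.drop i) →
      PySem.Chars.splitOn.go sep fuel l cur acc
        = PySem.Chars.splitOn.go sep (fuel - (r+1)) (l.drop (r + sep.length)) []
            ((cur.reverse ++ l.take r) :: acc) := by
  intro r
  induction r with
  | zero =>
    intro l fuel cur acc hfuel hpre _
    simp only [List.drop_zero] at hpre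
    cases l with
    | nil =>
      exact absurd (List.prefix_nil.mp hpre) hsep
    | cons c rest =>
      cases fuel with
      | zero => omega
      | succ f =>
        rw [PySem.Chars.splitOn.go]
        rw [if_pos (by simpa [List.isPrefixOf_iff_prefix] using hpre)]
        simp
  | succ r ih =>
    intro l fuel cur acc hfuel hpre hmin
    cases l with
    | nil =>
      simp only [List.drop_nil] at hpre
      exact absurd (List.prefix_nil.mp hpre) hsep
    | cons c rest =>
      cases fuel with
      | zero => omega
      | succ f =>
        rw [PySem.Chars.splitOn.go]
        have h0 : ¬ sep <+: (c :: rest) := by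
          have := hmin 0 (Nat.succ_pos r)
          simpa using this
        rw [if_neg (by simpa [List.isPrefixOf_iff_prefix] using h0)]
        rw [ih rest f (c :: cur) acc (by simp at hfuel; omega)
          (by simpa using hpre)
          (fun i hi => by simpa using hmin (i+1) (by omega))]
        have e1 : f + 1 - (r + 1 + 1) = f - (r + 1) := by omega
        have e2 : r + 1 + sep.length = (r + sep.length) + 1 := by omega
        rw [e1, e2, List.drop_succ_cons, List.take_succ_cons]
        simp

-- splitOn = swiPieces
theorem splitOn_eq_pieces (sep : List Char) (hsep : sep ≠ []) :
    ∀ (f2 : Nat) (l : List Char) (fuel : Nat) (acc : List (List Char)),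
      l.length < fuel → l.length < f2 →
      PySem.Chars.splitOn.go sep fuel l [] acc = acc.reverse ++ swiPieces sep f2 l := by
  intro f2
  induction f2 with
  | zero => intro l fuel acc _ h; omega
  | succ g ih =>
    intro l fuel acc hfuel hf2
    simp only [swiPieces]
    by_cases hr : PySem.Chars.find l sep < 0
    · have hr1 : PySem.Chars.find l sep = -1 := by
        have := PySem.Chars.neg_one_le_find l sep
        omega
      have hni : ¬ sep <:+: l := (PySem.Chars.find_eq_neg_one_iff l sep).mp hr1
      rw [go_no_occ sep hsep l fuel [] acc (by omega) hni]
      rw [if_pos hr]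
      simp
    · rw [not_lt] at hr
      have hspec := PySem.Chars.find_spec hr
      set r : Nat := (PySem.Chars.find l sep).toNat with hrdef
      have hlen : r + sep.length ≤ l.length := by
        have h1 : sep.length ≤ (l.drop r).length := hspec.1.length_le
        have h2 := PySem.Chars.find_le_length l sep
        simp [List.length_drop] at h1
        omega
      have hsl : 1 ≤ sep.length := List.length_pos_iff.mpr hsep
      rw [go_occ sep hsep r l fuel [] acc hfuel hspec.1 hspec.2]
      simp only [List.reverse_nil, List.nil_append]
      rw [ih (l.drop (r + sep.length)) (fuel - (r+1)) ((l.take r) :: acc)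
        (by simp [List.length_drop]; omega) (by simp [List.length_drop]; omega)]
      rw [if_neg (by omega)]
      simp

-- B's loop = aFoldC over the pieces of the remaining suffix
theorem goB_eq (text delim : List Char) (hd : delim ≠ []) :
    ∀ (f2 fB k : Nat), k ≤ text.length → text.length - k < fB → text.length - k < f2 →
      swiGoB text delim fB (k : Int)
        = aFoldC delim.length (swiPieces delim f2 (text.drop k)) (k : Int) := by
  intro f2
  induction f2 with
  | zero => intro fB k _ _ h; omega
  | succ g ih =>
    intro fB k hk hfB hf2
    cases fB with
    | zero => omega
    | succ fb =>
      simp only [swiGoB]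
      rw [PySem.Chars.findFrom_natCast text delim k hk]
      by_cases hr : PySem.Chars.find (text.drop k) delim = -1
      · rw [if_pos (by simp [hr])]
        rw [PySem.Chars.slice_eq_listSlice, PySem.List.slice_from_natCast]
        simp only [swiPieces]
        rw [if_pos (by simp [hr])]
        simp [aFoldC]
      · have h0 : 0 ≤ PySem.Chars.find (text.drop k) delim := by
          have := PySem.Chars.neg_one_le_find (text.drop k) delim
          omega
        have hspec := PySem.Chars.find_spec h0
        set r : Nat := (PySem.Chars.find (text.drop k) delim).toNat with hrdef
        have hrcast : PySem.Chars.find (text.drop k) delim = (r : Int) := by omega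
        rw [if_neg (by rw [hrcast]; omega)]
        have hsl : 1 ≤ delim.length := List.length_pos_iff.mpr hd
        have hrlen : r + delim.length ≤ text.length - k := by
          have h1 : delim.length ≤ ((text.drop k).drop r).length := hspec.1.length_le
          simp [List.length_drop] at h1
          omega
        rw [hrcast]
        rw [if_neg (show ¬((r : Int) = -1) by omega)]
        rw [PySem.Chars.slice_eq_listSlice, PySem.List.slice_natCast_add]
        have hk' : k + r + delim.length ≤ text.length := by omega
        have hidx : (k : Int) + (r : Int) + (delim.length : Int)
            = ((k + r + delim.length : Nat) : Int) := by push_cast; ring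
        rw [hidx, ih fb (k + r + delim.length) hk' (by omega) (by omega)]
        simp only [swiPieces]
        rw [if_neg (show ¬(PySem.Chars.find (text.drop k) delim < 0) by omega)]
        rw [hrcast]
        simp only [Int.toNat_natCast]
        have hdd : (text.drop k).drop (r + delim.length) = text.drop (k + r + delim.length) := by
          rw [List.drop_drop]; ring_nf
        have htl : ((text.drop k).take r).length = r := by
          simp [List.length_take, List.length_drop]; omega
        rw [hdd]
        simp [aFoldC, htl]

-- ===== VERDICT (by name: the statement is the Claim_ definition above) =====
theorem splits_with_index_spec : Claim_equal_splits_with_index := by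
  intro text delim _ hpre
  unfold Spec_splits_with_index splits_with_index splits_with_index_alt
  have hd : delim.toList ≠ [] := by
    intro h
    exact hpre (String.toList_eq_nil_iff.mp h)
  have hsplit : (PySem.Str.split? text delim).getD []
      = (PySem.Chars.splitOn text.toList delim.toList).map String.ofList := by
    simp [PySem.Str.split?, PySem.Chars.split?, List.isEmpty_iff, hd]
  rw [hsplit, foldA_eq, aFoldS_map]
  have hB := goB_eq text.toList delim.toList hd (text.toList.length + 1) (text.toList.length + 1) 0
    (by omega) (by omega) (by omega)
  simp only [Nat.cast_zero, List.drop_zero] at hB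
  rw [hB]
  have hso : PySem.Chars.splitOn text.toList delim.toList
      = swiPieces delim.toList (text.toList.length + 1) text.toList := by
    have := splitOn_eq_pieces delim.toList hd (text.toList.length + 1) text.toList
      (text.toList.length + 1) [] (by omega) (by omega)
    simpa [PySem.Chars.splitOn] using this
  simp [hso]
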